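-- pv_equiv track=rewrite | github.com/lazarus0320/Algorithm | 프로그래머스/2/42626. 더 맵게/더 맵게.py | solution
-- ===== SOURCE A (Python) =====
-- import heapq
--
-- def solution(scoville, K):
--     answer = 0
--     heapq.heapify(scoville)
--
--     while scoville[0] < K:
--         if len(scoville) < 2:
--             return -1
--         answer += 1
--         first = heapq.heappop(scoville)
--         second = heapq.heappop(scoville)
--
--         new_sco = first  + (second * 2)
--         heapq.heappush(scoville, new_sco)
--
--     return answer
-- ===== SOURCE B (Python) =====
-- def solution(scoville, K):
--     # Sorted-array version of the greedy: keep the list sorted, pop the two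
--     # smallest from the front, insert the mix back at its sorted position.
--     # (Mutates `scoville` like A does, but leaves it sorted, not heap-ordered;
--     # only the return value is claimed equal.)
--     scoville.sort()
--     answer = 0
--     while scoville[0] < K:
--         if len(scoville) < 2:
--             return -1
--         first = scoville.pop(0)
--         second = scoville.pop(0)
--         new_sco = first + 2 * second
--         k = 0
--         while k < len(scoville) and scoville[k] < new_sco:
--             k += 1
--         scoville.insert(k, new_sco)
--         answer += 1
--     return answer
-- ===== Notes on version B (the rewrite author's own statement) =====
-- stated objective: alternative
-- what changed: Replaces the binary heap (heapify/heappop/heappush) by a flat sorted list: sort once, pop the two smallest from the front, and re-insert the mixed value at its sorted position by a scan; same greedy sequence, different data structure.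
import Mathlib
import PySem

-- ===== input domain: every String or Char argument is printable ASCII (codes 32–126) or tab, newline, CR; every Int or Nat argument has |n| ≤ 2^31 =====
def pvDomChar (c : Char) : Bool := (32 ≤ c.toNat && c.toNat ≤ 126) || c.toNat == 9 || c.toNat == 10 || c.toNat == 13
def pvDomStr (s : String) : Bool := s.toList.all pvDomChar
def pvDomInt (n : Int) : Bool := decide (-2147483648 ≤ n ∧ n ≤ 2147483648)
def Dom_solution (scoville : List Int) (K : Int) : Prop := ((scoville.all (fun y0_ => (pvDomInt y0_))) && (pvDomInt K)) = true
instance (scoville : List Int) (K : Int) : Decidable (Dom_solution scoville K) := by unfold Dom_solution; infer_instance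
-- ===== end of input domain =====

-- B replaces A's binary heap by a flat sorted list (sort once, pop the two smallest
-- from the front, re-insert the mix at its sorted position): an alternative data
-- structure, not claimed faster.  Both Pythons mutate `scoville`; only the RETURN
-- value is claimed equal (A leaves heap order, B leaves sorted order).

-- ===== PORT A =====
-- heapq is ported as a functional min-heap (leftist heap): heapify = fold of pushes,
-- heappop = root + merge of children, heappush = merge with a singleton; it returns
-- the same sequence of minima as CPython's array heap, which is all A's result uses.
-- merge and the while loop carry an explicit fuel that provably never runs out
-- (fuel = node count), so every recursion is structural.
inductive LHeap : Type
  | nil : LHeap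
  | node : Nat → Int → LHeap → LHeap → LHeap
deriving DecidableEq, Repr

def LHeap.rank : LHeap → Nat
  | .nil => 0
  | .node r _ _ _ => r

def LHeap.size : LHeap → Nat
  | .nil => 0
  | .node _ _ l r => l.size + r.size + 1

def LHeap.toList : LHeap → List Int
  | .nil => []
  | .node _ v l r => v :: (l.toList ++ r.toList)

def LHeap.mk (v : Int) (a b : LHeap) : LHeap :=
  if b.rank ≤ a.rank then .node (b.rank + 1) v a b else .node (a.rank + 1) v b a

def LHeap.merge : Nat → LHeap → LHeap → LHeap
  | 0, _, _ => .nil                                -- fuel exhausted: unreachable with fuel ≥ size a + size b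
  | _ + 1, .nil, b => b
  | _ + 1, .node r1 v1 l1 d1, .nil => .node r1 v1 l1 d1
  | fuel + 1, .node r1 v1 l1 d1, .node r2 v2 l2 d2 =>
      if v1 ≤ v2 then LHeap.mk v1 l1 (LHeap.merge fuel d1 (.node r2 v2 l2 d2))
      else LHeap.mk v2 l2 (LHeap.merge fuel (.node r1 v1 l1 d1) d2)

def LHeap.push (x : Int) (h : LHeap) : LHeap :=
  LHeap.merge (h.size + 1) (.node 1 x .nil .nil) h

def LHeap.pop2 (l r : LHeap) : LHeap := LHeap.merge (l.size + r.size) l r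

-- the while loop of A: state = heap, counter; fuel = initial element count + 1
-- (each iteration removes one element, so the fuel never runs out)
def loopA : Nat → LHeap → Int → Int → Int
  | 0, _, _, _ => -1                               -- fuel exhausted: unreachable
  | _ + 1, .nil, _, _ => -1                        -- scoville[0] on an empty heap: unreachable under Pre_
  | fuel + 1, .node rk v l r, K, answer =>
      if v < K then
        if (LHeap.node rk v l r).toList.length < 2 then -1
        else
          match LHeap.pop2 l r with
          | .nil => -1                             -- unreachable: the heap had ≥ 2 elements
          | .node _ v2 l2 r2 =>
              loopA fuel (LHeap.push (v + 2 * v2) (LHeap.pop2 l2 r2)) K (answer + 1)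
      else answer

def solution (scoville : List Int) (K : Int) : Int :=
  loopA (scoville.length + 1) (scoville.foldl (fun h x => LHeap.push x h) .nil) K 0

-- ===== PORT B =====
-- the inner "scan for the insertion point and insert" loop of Source B
def insertSorted (x : Int) : List Int → List Int
  | [] => [x]
  | y :: t => if y < x then y :: insertSorted x t else x :: y :: t

-- the while loop of B: state = sorted list, counter; fuel = initial length + 1
def loopB : Nat → List Int → Int → Int → Int
  | 0, _, _, _ => -1                               -- fuel exhausted: unreachable
  | _ + 1, [], _, _ => -1                          -- scoville[0] on an empty list: unreachable under Pre_
  | _ + 1, [a], K, answer => if a < K then -1 else answer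
  | fuel + 1, a :: b :: t, K, answer =>
      if a < K then loopB fuel (insertSorted (a + 2 * b) t) K (answer + 1) else answer

def solution_alt (scoville : List Int) (K : Int) : Int :=
  loopB ((PySem.List.sorted scoville (fun x => x) false).length + 1)
    (PySem.List.sorted scoville (fun x => x) false) K 0

-- ===== PRECONDITION & SPEC =====
-- Pre_ excludes only the empty list, on which A raises IndexError at scoville[0].
def Pre_solution (scoville : List Int) (K : Int) : Prop := scoville ≠ []
instance (scoville : List Int) (K : Int) : Decidable (Pre_solution scoville K) := by unfold Pre_solution; infer_instance

def pvWitness_solution : List Int × Int := ([1, 2, 3, 9, 10, 12], 7)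

def Spec_solution (scoville : List Int) (K : Int) (out : Int) : Prop := out = solution_alt scoville K
instance (scoville : List Int) (K : Int) (out : Int) : Decidable (Spec_solution scoville K out) := by unfold Spec_solution; infer_instance

-- ===== CLAIM (what is proved, stated in full; the proofs are below) =====
def Claim_equal_solution : Prop := ∀ (scoville : List Int) (K : Int), Dom_solution scoville K → Pre_solution scoville K → Spec_solution scoville K (solution scoville K)

-- ===== LEMMAS AND PROOFS =====

theorem LHeap.size_eq_zero {h : LHeap} (hs : h.size = 0) : h = .nil := by
  cases h with
  | nil => rfl
  | node rk v l r => simp [LHeap.size] at hs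

theorem LHeap.mk_toList (v : Int) (a b : LHeap) :
    (LHeap.mk v a b).toList.Perm (v :: (a.toList ++ b.toList)) := by
  unfold LHeap.mk
  split_ifs
  · exact List.Perm.refl _
  · exact List.Perm.cons _ List.perm_append_comm

theorem LHeap.merge_toList (fuel : Nat) : ∀ (a b : LHeap), a.size + b.size ≤ fuel →
    (LHeap.merge fuel a b).toList.Perm (a.toList ++ b.toList) := by
  induction fuel with
  | zero =>
      intro a b hf
      have ha : a = .nil := LHeap.size_eq_zero (by omega)
      have hb : b = .nil := LHeap.size_eq_zero (by omega)
      subst ha; subst hb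
      simp [LHeap.merge, LHeap.toList]
  | succ fuel ih =>
      intro a b hf
      cases a with
      | nil => simp [LHeap.merge, LHeap.toList]
      | node r1 v1 l1 d1 =>
        cases b with
        | nil => simp [LHeap.merge, LHeap.toList]
        | node r2 v2 l2 d2 =>
          rw [LHeap.merge]
          split_ifs with hle
          · refine (LHeap.mk_toList _ _ _).trans ?_
            have ihm := ih d1 (.node r2 v2 l2 d2) (by simp [LHeap.size] at hf ⊢; omega)
            show (v1 :: (l1.toList ++ (LHeap.merge fuel d1 (LHeap.node r2 v2 l2 d2)).toList)).Perm
              ((LHeap.node r1 v1 l1 d1).toList ++ (LHeap.node r2 v2 l2 d2).toList)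
            simp only [LHeap.toList, List.cons_append, List.append_assoc]
            exact List.Perm.cons _ (List.Perm.append_left _ ihm)
          · refine (LHeap.mk_toList _ _ _).trans ?_
            have ihm := ih (.node r1 v1 l1 d1) d2 (by simp [LHeap.size] at hf ⊢; omega)
            show (v2 :: (l2.toList ++ (LHeap.merge fuel (LHeap.node r1 v1 l1 d1) d2).toList)).Perm
              ((LHeap.node r1 v1 l1 d1).toList ++ (LHeap.node r2 v2 l2 d2).toList)
            have s1 : (l2.toList ++ (LHeap.merge fuel (LHeap.node r1 v1 l1 d1) d2).toList).Perm
                (l2.toList ++ ((LHeap.node r1 v1 l1 d1).toList ++ d2.toList)) :=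
              List.Perm.append_left _ ihm
            have s2 : (l2.toList ++ ((LHeap.node r1 v1 l1 d1).toList ++ d2.toList)).Perm
                ((LHeap.node r1 v1 l1 d1).toList ++ (l2.toList ++ d2.toList)) := by
              rw [← List.append_assoc, ← List.append_assoc]
              exact List.Perm.append_right _ List.perm_append_comm
            have s3 : (v2 :: ((LHeap.node r1 v1 l1 d1).toList ++ (l2.toList ++ d2.toList))).Perm
                ((LHeap.node r1 v1 l1 d1).toList ++ v2 :: (l2.toList ++ d2.toList)) :=
              List.perm_middle.symm
            exact ((s1.trans s2).cons v2).trans s3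

theorem LHeap.pop2_toList (l r : LHeap) :
    (LHeap.pop2 l r).toList.Perm (l.toList ++ r.toList) :=
  LHeap.merge_toList _ l r (le_refl _)

theorem LHeap.push_toList (x : Int) (h : LHeap) :
    (LHeap.push x h).toList.Perm (x :: h.toList) := by
  simpa [LHeap.toList] using
    LHeap.merge_toList (h.size + 1) (.node 1 x .nil .nil) h (by simp [LHeap.size]; omega)

-- heap invariant: every node's value is ≤ everything below it
def LHeap.Inv : LHeap → Prop
  | .nil => True
  | .node _ v l r => (∀ x ∈ l.toList ++ r.toList, v ≤ x) ∧ l.Inv ∧ r.Inv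

theorem LHeap.Inv.root_le {rk : Nat} {v : Int} {l r : LHeap}
    (h : (LHeap.node rk v l r).Inv) : ∀ x ∈ (LHeap.node rk v l r).toList, v ≤ x := by
  intro x hx
  simp only [LHeap.toList, List.mem_cons] at hx
  rcases hx with rfl | hx
  · exact le_refl _
  · exact h.1 x hx

theorem LHeap.mk_Inv {v : Int} {a b : LHeap}
    (hab : ∀ x ∈ a.toList ++ b.toList, v ≤ x) (ha : a.Inv) (hb : b.Inv) :
    (LHeap.mk v a b).Inv := by
  unfold LHeap.mk
  split_ifs
  · exact ⟨hab, ha, hb⟩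
  · refine ⟨?_, hb, ha⟩
    intro x hx
    exact hab x (by simpa [or_comm] using hx)

theorem LHeap.merge_Inv (fuel : Nat) : ∀ {a b : LHeap}, a.size + b.size ≤ fuel →
    a.Inv → b.Inv → (LHeap.merge fuel a b).Inv := by
  induction fuel with
  | zero => intro a b hf ha hb; simp [LHeap.merge, LHeap.Inv]
  | succ fuel ih =>
      intro a b hf ha hb
      cases a with
      | nil => simpa [LHeap.merge]
      | node r1 v1 l1 d1 =>
        cases b with
        | nil => simpa [LHeap.merge]
        | node r2 v2 l2 d2 =>
          rw [LHeap.merge]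
          split_ifs with hle
          · have hf' : d1.size + (LHeap.node r2 v2 l2 d2).size ≤ fuel := by
              simp [LHeap.size] at hf ⊢; omega
            refine LHeap.mk_Inv ?_ ha.2.1 (ih hf' ha.2.2 hb)
            intro x hx
            rcases List.mem_append.1 hx with hx | hx
            · exact ha.1 x (List.mem_append.2 (Or.inl hx))
            · have hx' : x ∈ d1.toList ++ (LHeap.node r2 v2 l2 d2).toList :=
                (LHeap.merge_toList fuel _ _ hf').subset hx
              rcases List.mem_append.1 hx' with h' | h'
              · exact ha.1 x (List.mem_append.2 (Or.inr h'))
              · exact le_trans hle (LHeap.Inv.root_le hb x h')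
          · have hf' : (LHeap.node r1 v1 l1 d1).size + d2.size ≤ fuel := by
              simp [LHeap.size] at hf ⊢; omega
            refine LHeap.mk_Inv ?_ hb.2.1 (ih hf' ha hb.2.2)
            intro x hx
            rcases List.mem_append.1 hx with hx | hx
            · exact hb.1 x (List.mem_append.2 (Or.inl hx))
            · have hx' : x ∈ (LHeap.node r1 v1 l1 d1).toList ++ d2.toList :=
                (LHeap.merge_toList fuel _ _ hf').subset hx
              rcases List.mem_append.1 hx' with h' | h'
              · exact le_trans (le_of_lt (not_le.mp hle)) (LHeap.Inv.root_le ha x h')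
              · exact hb.1 x (List.mem_append.2 (Or.inr h'))

theorem LHeap.pop2_Inv {l r : LHeap} (hl : l.Inv) (hr : r.Inv) : (LHeap.pop2 l r).Inv :=
  LHeap.merge_Inv _ (le_refl _) hl hr

theorem LHeap.push_Inv {h : LHeap} (x : Int) (hh : h.Inv) : (LHeap.push x h).Inv :=
  LHeap.merge_Inv _ (by simp [LHeap.size]; omega) (by simp [LHeap.Inv, LHeap.toList]) hh

-- heapify: a fold of pushes builds an invariant heap holding exactly the input
theorem foldl_push_Inv (l : List Int) : ∀ (h : LHeap), h.Inv →
    (l.foldl (fun h x => LHeap.push x h) h).Inv := by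
  induction l with
  | nil => intro h hh; simpa
  | cons x t ih => intro h hh; exact ih _ (LHeap.push_Inv x hh)

theorem heapify_Inv (l : List Int) :
    (l.foldl (fun h x => LHeap.push x h) .nil).Inv :=
  foldl_push_Inv l .nil trivial

theorem foldl_push_toList (l : List Int) : ∀ (h : LHeap),
    (l.foldl (fun h x => LHeap.push x h) h).toList.Perm (h.toList ++ l) := by
  induction l with
  | nil => intro h; simp
  | cons x t ih =>
      intro h
      refine (ih _).trans ?_
      refine List.Perm.trans (List.Perm.append_right t (LHeap.push_toList x h)) ?_
      exact List.perm_middle.symm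

theorem heapify_toList (l : List Int) :
    (l.foldl (fun h x => LHeap.push x h) .nil).toList.Perm l := by
  simpa [LHeap.toList] using foldl_push_toList l .nil

-- B's insertion is Mathlib's orderedInsert
theorem insertSorted_eq_orderedInsert (x : Int) (l : List Int) :
    insertSorted x l = List.orderedInsert (· ≤ ·) x l := by
  induction l with
  | nil => rfl
  | cons y t ih =>
      simp only [insertSorted, List.orderedInsert]
      by_cases h : y < x
      · rw [if_pos h, if_neg (by omega), ih]
      · rw [if_neg h, if_pos (by omega)]

theorem insertSorted_length (x : Int) (l : List Int) :
    (insertSorted x l).length = l.length + 1 := by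
  induction l with
  | nil => simp [insertSorted]
  | cons y t ih => simp only [insertSorted]; split_ifs <;> simp [ih]

-- the two loops agree whenever heap and list carry the same multiset, the heap is
-- a min-heap, the list is sorted and the fuel exceeds the element count
theorem loop_eq (fuel : Nat) : ∀ (h : LHeap) (l : List Int) (K ans : Int),
    h.Inv → l.Pairwise (· ≤ ·) → h.toList.Perm l → l.length < fuel →
    loopA fuel h K ans = loopB fuel l K ans := by
  induction fuel with
  | zero => intro h l K ans _ _ _ hLen; omega
  | succ fuel ih =>
    intro h l K ans hInv hSort hPerm hLen
    cases h with
    | nil =>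
        have hl : l = [] := by
          have := hPerm.symm.eq_nil
          simpa [LHeap.toList] using this
        subst hl
        simp [loopA, loopB]
    | node rk v hl hr =>
        cases l with
        | nil =>
            exact absurd (List.Perm.eq_nil hPerm) (by simp [LHeap.toList])
        | cons a t =>
            -- the heap root equals the list head
            have hmemv : v ∈ a :: t := hPerm.subset (by simp [LHeap.toList])
            have hva : v = a := by
              refine le_antisymm ?_ ?_
              · exact LHeap.Inv.root_le hInv a (hPerm.mem_iff.2 (by simp))
              · rcases List.mem_cons.1 hmemv with h' | h'
                · omega
                · exact (List.pairwise_cons.1 hSort).1 v h'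
            subst hva
            have hlen : (LHeap.node rk v hl hr).toList.length = t.length + 1 := by
              simpa using hPerm.length_eq
            by_cases hvK : v < K
            · cases t with
              | nil =>
                  rw [loopA, loopB, if_pos hvK, if_pos hvK,
                    if_pos (by simp at hlen; omega)]
              | cons b t' =>
                  -- the children merge carries exactly b :: t'
                  have hrest : (hl.toList ++ hr.toList).Perm (b :: t') := by
                    have := hPerm
                    simp only [LHeap.toList] at this
                    exact this.cons_inv
                  have hpm : (LHeap.pop2 hl hr).toList.Perm (b :: t') :=
                    (LHeap.pop2_toList hl hr).trans hrest
                  have hInvM : (LHeap.pop2 hl hr).Inv :=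
                    LHeap.pop2_Inv hInv.2.1 hInv.2.2
                  rw [loopA, loopB, if_pos hvK, if_pos hvK,
                    if_neg (by simp at hlen; omega)]
                  split
                  next hmm =>
                      rw [hmm] at hpm
                      exact absurd hpm.symm.eq_nil (by simp)
                  next rk2 v2 l2 r2 hmm =>
                      rw [hmm] at hpm hInvM
                      -- the second minimum equals the second list element
                      have hSort' : (b :: t').Pairwise (· ≤ · : Int → Int → Prop) :=
                        (List.pairwise_cons.1 hSort).2
                      have hv2b : v2 = b := by
                        refine le_antisymm ?_ ?_
                        · exact LHeap.Inv.root_le hInvM b (hpm.mem_iff.2 (by simp))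
                        · have hmem2 : v2 ∈ b :: t' := hpm.subset (by simp [LHeap.toList])
                          rcases List.mem_cons.1 hmem2 with h' | h'
                          · omega
                          · exact (List.pairwise_cons.1 hSort').1 v2 h'
                      subst hv2b
                      have hrest2 : (l2.toList ++ r2.toList).Perm t' := by
                        have := hpm
                        simp only [LHeap.toList] at this
                        exact this.cons_inv
                      -- next states carry the same multiset
                      have hnextPerm : (LHeap.push (v + 2 * v2) (LHeap.pop2 l2 r2)).toList.Perm
                          (insertSorted (v + 2 * v2) t') := by
                        refine (LHeap.push_toList _ _).trans ?_
                        refine List.Perm.trans (List.Perm.cons _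
                          ((LHeap.pop2_toList l2 r2).trans hrest2)) ?_
                        rw [insertSorted_eq_orderedInsert]
                        exact (List.perm_orderedInsert _ _ _).symm
                      have hnextSort : (insertSorted (v + 2 * v2) t').Pairwise (· ≤ · : Int → Int → Prop) := by
                        rw [insertSorted_eq_orderedInsert]
                        exact List.Pairwise.orderedInsert _ _ ((List.pairwise_cons.1 hSort').2)
                      have hnextInv : (LHeap.push (v + 2 * v2) (LHeap.pop2 l2 r2)).Inv :=
                        LHeap.push_Inv _ (LHeap.pop2_Inv hInvM.2.1 hInvM.2.2)
                      exact ih _ _ K (ans + 1) hnextInv hnextSort hnextPerm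
                        (by simp [insertSorted_length]; simp at hLen; omega)
            · cases t with
              | nil => rw [loopA, loopB, if_neg hvK, if_neg hvK]
              | cons b t' => rw [loopA, loopB, if_neg hvK, if_neg hvK]

-- ===== VERDICT (by name: the statement is the Claim_ definition above) =====
theorem solution_spec : Claim_equal_solution := by
  intro scoville K _ _
  unfold Spec_solution solution solution_alt
  have hslen : (PySem.List.sorted scoville (fun x => x) false).length = scoville.length :=
    (PySem.List.sorted_perm scoville (fun x => x) false).length_eq
  rw [hslen]
  refine loop_eq (scoville.length + 1) _ _ _ _
    (heapify_Inv scoville) ?_ ?_ (by rw [hslen]; omega)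
  · simpa using PySem.List.sorted_pairwise scoville (fun x => x)
  · exact (heapify_toList scoville).trans (PySem.List.sorted_perm scoville (fun x => x) false).symm
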